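-- pv_equiv track=rewrite | github.com/KeunwooKim/Message_NER | main.py | create_bio_tags
-- ===== SOURCE A (Python) =====
-- def create_bio_tags(message, regions):
--     tokens = message.split()
--     tags = ['O'] * len(tokens)
--
--     for region in regions:
--         if region in message:
--             region_tokens = region.split()
--             for i in range(len(tokens) - len(region_tokens) + 1):
--                 if tokens[i:i+len(region_tokens)] == region_tokens:
--                     if all(tags[j] == 'O' for j in range(i, i + len(region_tokens))):
--                         tags[i] = 'B-LOCATION'
--                         for j in range(1, len(region_tokens)):
--                             tags[i+j] = 'I-LOCATION'
--
--     return {"tokens": tokens, "tags": tags}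
-- ===== SOURCE B (Python) =====
-- def create_bio_tags(message, regions):
--     tokens = message.split()
--     tags = ['O'] * len(tokens)
--     index = {}
--     for i, tok in enumerate(tokens):
--         index.setdefault(tok, []).append(i)
--     for region in regions:
--         if region in message:
--             region_tokens = region.split()
--             if region_tokens:
--                 n = len(region_tokens)
--                 for i in index.get(region_tokens[0], []):
--                     if tokens[i:i+n] == region_tokens and all(t == 'O' for t in tags[i:i+n]):
--                         tags[i:i+n] = ['B-LOCATION'] + ['I-LOCATION'] * (n - 1)
--     return {"tokens": tokens, "tags": tags}
-- ===== Notes on version B (the rewrite author's own statement) =====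
-- stated objective: alternative
-- what changed: B builds an inverted index token->ascending positions once and, per region, probes only the candidate start positions of the region's first token (splicing the tag window in one slice assignment), instead of A's scan over every start position per region; Pre_ excludes whitespace-only regions occurring in the message, on which A raises IndexError.
-- crash fix: On inputs where some region is whitespace-only (split() empty) yet occurs as a substring of the message, A raises IndexError writing tags[len(tokens)]; B skips the empty token list and returns the tags built so far. — e.g. on create_bio_tags("hi", [""]): A raises IndexError, B returns [("tokens", ["hi"]), ("tags", ["O"])]
import Mathlib
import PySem

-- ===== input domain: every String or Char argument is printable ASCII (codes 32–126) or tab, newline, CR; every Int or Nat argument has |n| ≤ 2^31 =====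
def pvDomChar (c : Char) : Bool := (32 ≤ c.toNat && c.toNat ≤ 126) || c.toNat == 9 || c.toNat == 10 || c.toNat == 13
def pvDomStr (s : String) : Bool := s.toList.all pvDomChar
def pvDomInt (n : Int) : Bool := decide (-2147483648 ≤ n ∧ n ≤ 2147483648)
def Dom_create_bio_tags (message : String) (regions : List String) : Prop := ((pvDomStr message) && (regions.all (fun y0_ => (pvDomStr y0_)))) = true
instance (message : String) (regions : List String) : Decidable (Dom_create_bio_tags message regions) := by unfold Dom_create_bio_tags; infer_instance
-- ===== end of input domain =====

-- B replaces A's scan over every start position per region by an inverted index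
-- token → ascending positions, iterating only candidate starts (objective: alternative).

-- ===== PORT A =====
-- one iteration of A's inner 'for i in range(...)' body (tags is the mutable list)
def pvStepA (tokens rt : List String) (tags : List String) (i : Int) : List String :=
  if PySem.List.slice tokens (some i) (some (i + (rt.length : Int))) == rt then
    if (PySem.List.pyRange i (i + (rt.length : Int)) 1).all
        (fun j => PySem.List.pyGetD tags j "" == "O") then
      (PySem.List.pyRange 1 (rt.length : Int) 1).foldl
        (fun t j => PySem.List.pySetD t (i + j) "I-LOCATION")
        (PySem.List.pySetD tags i "B-LOCATION")
    else tags
  else tags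

def create_bio_tags (message : String) (regions : List String) : List (String × List String) :=
  let tokens := PySem.Str.split₀ message
  let tags0 : List String := List.replicate tokens.length "O"
  let tags := regions.foldl (fun tags region =>
    if PySem.Str.isIn region message then
      let rt := PySem.Str.split₀ region
      (PySem.List.pyRange 0 ((tokens.length : Int) - (rt.length : Int) + 1) 1).foldl
        (pvStepA tokens rt) tags
    else tags) tags0
  [("tokens", tokens), ("tags", tags)]

-- ===== PORT B =====
-- one iteration of B's 'for i in index.get(...)' body; the slice assignment
-- tags[i:i+n] = [...] is exact as take/++/drop because 0 ≤ i (i comes from enumerate)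
def pvStepB (tokens rt : List String) (tags : List String) (i : Int) : List String :=
  if PySem.List.slice tokens (some i) (some (i + (rt.length : Int))) == rt
      && (PySem.List.slice tags (some i) (some (i + (rt.length : Int)))).all (fun t => t == "O") then
    tags.take i.toNat ++ ("B-LOCATION" :: List.replicate (rt.length - 1) "I-LOCATION")
      ++ tags.drop (i.toNat + rt.length)
  else tags

def create_bio_tags_alt (message : String) (regions : List String) : List (String × List String) :=
  let tokens := PySem.Str.split₀ message
  let tags0 : List String := List.replicate tokens.length "O"
  -- index.setdefault(tok, []).append(i)  ==  modify tok [] (· ++ [i])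
  let index : PySem.Dict String (List Int) := (PySem.List.enumerate tokens).foldl
      (fun d p => d.modify p.2 [] (fun l => l ++ [p.1])) PySem.Dict.empty
  let tags := regions.foldl (fun tags region =>
    if PySem.Str.isIn region message then
      match PySem.Str.split₀ region with
      | [] => tags
      | t0 :: rest => (index.getD t0 []).foldl (pvStepB tokens (t0 :: rest)) tags
    else tags) tags0
  [("tokens", tokens), ("tags", tags)]

-- ===== PRECONDITION & SPEC =====
-- Pre_ excludes exactly the inputs where A raises IndexError: a whitespace-only
-- region that occurs as a substring of the message (its split() is empty, so A's
-- inner loop runs i up to len(tokens) and writes tags[len(tokens)]).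
def Pre_create_bio_tags (message : String) (regions : List String) : Prop :=
  ∀ r ∈ regions, PySem.Str.isIn r message = true → PySem.Str.split₀ r ≠ []
instance (message : String) (regions : List String) : Decidable (Pre_create_bio_tags message regions) := by
  unfold Pre_create_bio_tags; infer_instance

def pvWitness_create_bio_tags : String × List String :=
  ("go to seoul station now", ["seoul station", "paris"])

-- On inputs with a whitespace-only region occurring in the message A raises IndexError;
-- B skips the empty token list and returns the tags built so far.
def Raises_create_bio_tags (message : String) (regions : List String) : Prop :=
  ∃ r ∈ regions, PySem.Str.isIn r message = true ∧ PySem.Str.split₀ r = []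
instance (message : String) (regions : List String) : Decidable (Raises_create_bio_tags message regions) := by
  unfold Raises_create_bio_tags; infer_instance

def pvRaiseWitness_create_bio_tags : String × List String := ("hi", [""])
def pvRaiseWitnessOut_create_bio_tags : List (String × List String) :=
  [("tokens", ["hi"]), ("tags", ["O"])]

def Spec_create_bio_tags (message : String) (regions : List String) (out : List (String × List String)) : Prop :=
  out = create_bio_tags_alt message regions
instance (message : String) (regions : List String) (out : List (String × List String)) : Decidable (Spec_create_bio_tags message regions out) := by
  unfold Spec_create_bio_tags; infer_instance

-- ===== CLAIM (what is proved, stated in full; the proofs are below) =====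
def Claim_equal_create_bio_tags : Prop := ∀ (message : String) (regions : List String), Dom_create_bio_tags message regions → Pre_create_bio_tags message regions → Spec_create_bio_tags message regions (create_bio_tags message regions)

def Claim_raises_create_bio_tags : Prop := (∀ (message : String) (regions : List String), Dom_create_bio_tags message regions → Raises_create_bio_tags message regions → ¬ Pre_create_bio_tags message regions) ∧ (Dom_create_bio_tags (pvRaiseWitness_create_bio_tags.1) (pvRaiseWitness_create_bio_tags.2) ∧ Raises_create_bio_tags (pvRaiseWitness_create_bio_tags.1) (pvRaiseWitness_create_bio_tags.2) ∧ create_bio_tags_alt (pvRaiseWitness_create_bio_tags.1) (pvRaiseWitness_create_bio_tags.2) = pvRaiseWitnessOut_create_bio_tags)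

-- ===== LEMMAS AND PROOFS =====

-- drop the elements on which the step function is the identity
theorem pv_foldl_filter {α β : Type} (f : β → α → β) (p : α → Bool) (l : List α) (init : β)
    (h : ∀ acc x, x ∈ l → p x = false → f acc x = acc) :
    l.foldl f init = (l.filter p).foldl f init := by
  induction l generalizing init with
  | nil => rfl
  | cons x t ih =>
    by_cases hp : p x = true
    · simp [hp]
      exact ih (f init x) (fun acc y hy => h acc y (List.mem_cons_of_mem _ hy))
    · simp only [Bool.not_eq_true] at hp
      simp [hp, h init x (List.mem_cons_self) hp]
      exact ih init (fun acc y hy => h acc y (List.mem_cons_of_mem _ hy))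

-- pointwise-equal step functions under an invariant carried through the fold
theorem pv_foldl_congr_inv {α β : Type} (P : β → Prop) (f g : β → α → β) (l : List α) (init : β)
    (hinit : P init) (h : ∀ acc x, P acc → x ∈ l → f acc x = g acc x ∧ P (f acc x)) :
    l.foldl f init = l.foldl g init ∧ P (l.foldl f init) := by
  induction l generalizing init with
  | nil => exact ⟨rfl, hinit⟩
  | cons x t ih =>
    obtain ⟨heq, hP⟩ := h init x hinit (List.mem_cons_self)
    obtain ⟨h1, h2⟩ := ih (f init x) hP (fun acc y hPacc hy => h acc y hPacc (List.mem_cons_of_mem _ hy))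
    refine ⟨?_, h2⟩
    simp only [List.foldl_cons]
    rw [h1, heq]

-- writing "I-LOCATION" at positions i, i+1, …, i+c-1 is a splice
theorem pv_set_run (c : Nat) (t : List String) (i : Nat) (h : i + c ≤ t.length) :
    (List.range c).foldl (fun t k => t.set (i + k) "I-LOCATION") t
      = t.take i ++ List.replicate c "I-LOCATION" ++ t.drop (i + c) := by
  induction c with
  | zero => simp
  | succ c ih =>
    rw [List.range_succ, List.foldl_append, ih (by omega)]
    simp only [List.foldl_cons, List.foldl_nil]
    have hti : (t.take i).length = i := by simp; omega
    have hrc : (List.replicate c "I-LOCATION").length = c := by simp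
    rw [List.append_assoc, List.set_append]
    rw [if_neg (by omega), List.set_append, hrc, hti, if_neg (by omega)]
    have hd : t.drop (i+c) = t[i+c]'(by omega) :: t.drop (i+c+1) := List.drop_eq_getElem_cons (by omega)
    rw [hd]
    have h0 : i + c - i - c = 0 := by omega
    rw [h0, List.set_cons_zero, List.replicate_succ']
    simp [Nat.add_assoc]

-- a matching slice pins the window inside the token list and its first token
theorem pv_match_bounds (tokens : List String) (t0 : String) (rest : List String) (i : Int) (hi : 0 ≤ i)
    (hp : PySem.List.slice tokens (some i) (some (i + ((t0 :: rest).length : Int))) = t0 :: rest) :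
    i.toNat + (t0 :: rest).length ≤ tokens.length ∧ tokens[i.toNat]? = some t0 := by
  rw [PySem.List.slice_toNat tokens hi (by positivity)] at hp
  have hc : (i + ((t0 :: rest).length : Int)).toNat - i.toNat = (t0 :: rest).length := by omega
  rw [hc] at hp
  have hlen := congrArg List.length hp
  simp [List.length_take] at hlen
  have h2 := congrArg (fun l => l[0]?) hp
  simp at h2
  exact ⟨by simp; omega, h2⟩


-- A's index-by-index "all tags O" test equals B's test on the tags slice
theorem pv_all_eq (tags : List String) (i : Int) (hi : 0 ≤ i) (m : Nat) (hm : i.toNat + m ≤ tags.length) :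
    ((PySem.List.pyRange i (i + (m : Int)) 1).all (fun j => PySem.List.pyGetD tags j "" == "O"))
      = ((PySem.List.slice tags (some i) (some (i + (m : Int)))).all (fun t => t == "O")) := by
  rw [PySem.List.slice_toNat tags hi (by positivity)]
  have hc : (i + (m : Int)).toNat - i.toNat = m := by omega
  rw [hc, PySem.List.pyRange_one]
  have hc2 : ((i + (m : Int)) - i).toNat = m := by omega
  rw [hc2]
  have hlist : List.take m (List.drop i.toNat tags)
      = (List.range m).map (fun (k : Nat) => PySem.List.pyGetD tags (i + (k : Int)) "") := by
    apply List.ext_getElem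
    · simp; omega
    · intro k h1 h2
      simp only [List.getElem_take, List.getElem_drop, List.getElem_map, List.getElem_range]
      rw [PySem.List.pyGetD_eq_getElem tags "" (by positivity) (by simp at h1 ⊢; omega)]
      congr 1
      omega
  rw [hlist, List.all_map, List.all_map]
  rfl


-- on a matching start position the two step functions agree and preserve the length
theorem pv_step_eq (tokens : List String) (t0 : String) (rest : List String) (tags : List String)
    (hlen : tags.length = tokens.length) (i : Int) (hi : 0 ≤ i)
    (hp : PySem.List.slice tokens (some i) (some (i + ((t0 :: rest).length : Int))) = t0 :: rest) :
    pvStepA tokens (t0 :: rest) tags i = pvStepB tokens (t0 :: rest) tags i ∧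
      (pvStepB tokens (t0 :: rest) tags i).length = tokens.length := by
  obtain ⟨hb, _⟩ := pv_match_bounds tokens t0 rest i hi hp
  have hbt : i.toNat + (t0 :: rest).length ≤ tags.length := by rw [hlen]; exact hb
  have hpq : (PySem.List.slice tokens (some i) (some (i + ((t0 :: rest).length : Int))) == t0 :: rest) = true :=
    beq_iff_eq.mpr hp
  unfold pvStepA pvStepB
  rw [pv_all_eq tags i hi (t0 :: rest).length hbt, hpq]
  simp only [Bool.true_and, if_true]
  by_cases hc : ((PySem.List.slice tags (some i) (some (i + ((t0 :: rest).length : Int)))).all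
      (fun t => t == "O")) = true
  · rw [if_pos hc, if_pos hc]
    constructor
    · rw [PySem.List.pySetD_of_nonneg tags _ hi, PySem.List.pyRange_one 1 _]
      have hcnt : (((t0 :: rest).length : Int) - 1).toNat = rest.length := by simp
      rw [hcnt, List.foldl_map]
      have hsteps : ∀ (acc : List String), ∀ k ∈ List.range rest.length,
          PySem.List.pySetD acc (i + (1 + (k : Int))) "I-LOCATION"
            = acc.set (i.toNat + 1 + k) "I-LOCATION" := by
        intro acc k _
        rw [PySem.List.pySetD_of_nonneg acc _ (by omega)]
        congr 1
        omega
      rw [List.foldl_ext _ _ _ hsteps]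
      rw [pv_set_run rest.length (tags.set i.toNat "B-LOCATION") (i.toNat + 1)
          (by simp at hbt ⊢; omega)]
      rw [List.take_set, List.drop_set, if_pos (by omega)]
      have ht1 : tags.take (i.toNat + 1) = tags.take i.toNat ++ tags[i.toNat]?.toList := List.take_add_one
      have hgg : tags[i.toNat]? = some (tags[i.toNat]'(by simp at hbt ⊢; omega)) := by
        rw [List.getElem?_eq_getElem]
      rw [ht1, hgg, List.set_append, List.length_take, if_neg (by simp at hbt ⊢)]
      have h0 : i.toNat - min i.toNat tags.length = 0 := by simp at hbt ⊢; omega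
      rw [h0]
      simp only [Option.toList_some, List.set_cons_zero]
      have hidx : i.toNat + 1 + rest.length = i.toNat + (t0 :: rest).length := by
        simp; omega
      rw [hidx]
      simp
    · simp only [List.length_append, List.length_take, List.length_drop, List.length_replicate,
        List.length_cons]
      simp at hbt
      omega
  · rw [if_neg hc, if_neg hc]
    exact ⟨rfl, by rw [hlen]⟩


-- the inverted index looked up at t0 is the ascending list of positions of t0
theorem pv_index_getD (tokens : List String) (t0 : String) :
    ((PySem.List.enumerate tokens).foldl
        (fun d p => d.modify p.2 [] (fun l => l ++ [p.1])) PySem.Dict.empty).getD t0 []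
      = (PySem.List.pyRange 0 (tokens.length : Int) 1).filter
          (fun j => PySem.List.pyGetD tokens j "" == t0) := by
  rw [PySem.List.enumerate_eq_map_pyRange tokens ""]
  rw [List.foldl_map]
  have h : (PySem.List.pyRange 0 (PySem.List.len tokens) 1).foldl
      (fun d (j : Int) => PySem.Dict.modify d (PySem.List.pyGetD tokens j "") [] (fun l => l ++ [j])) PySem.Dict.empty
    = ((PySem.List.pyRange 0 (PySem.List.len tokens) 1).map
        (fun (j : Int) => (PySem.List.pyGetD tokens j "", j))).foldl
      (fun d p => PySem.Dict.modify d p.1 [] (fun l => l ++ [p.2])) PySem.Dict.empty := by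
    rw [List.foldl_map]
  rw [h, PySem.Dict.getD_foldl_modify_append]
  simp [List.filter_map, List.map_map, Function.comp_def]


-- A's start range and B's candidate positions agree once filtered to matching starts
theorem pv_filter_eq (tokens : List String) (t0 : String) (rest : List String) :
    (PySem.List.pyRange 0 ((tokens.length : Int) - ((t0 :: rest).length : Int) + 1) 1).filter
        (fun i => PySem.List.slice tokens (some i) (some (i + ((t0 :: rest).length : Int))) == t0 :: rest)
      = ((PySem.List.pyRange 0 (tokens.length : Int) 1).filter
            (fun j => PySem.List.pyGetD tokens j "" == t0)).filter
          (fun i => PySem.List.slice tokens (some i) (some (i + ((t0 :: rest).length : Int))) == t0 :: rest) := by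
  apply List.Perm.eq_of_pairwise (le := fun (a b : Int) => a ≤ b)
  · intro a b _ _ h1 h2; omega
  · exact ((PySem.List.pairwise_lt_pyRange_one _ _).filter _).imp (fun h => le_of_lt h)
  · exact (((PySem.List.pairwise_lt_pyRange_one _ _).filter _).filter _).imp (fun h => le_of_lt h)
  · rw [List.perm_ext_iff_of_nodup
      (((PySem.List.pairwise_lt_pyRange_one _ _).filter _).imp (fun h => ne_of_lt h))
      ((((PySem.List.pairwise_lt_pyRange_one _ _).filter _).filter _).imp (fun h => ne_of_lt h))]
    intro a
    simp only [List.mem_filter, PySem.List.mem_pyRange_one, beq_iff_eq]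
    constructor
    · rintro ⟨⟨h0, _⟩, hq⟩
      obtain ⟨hb, hh⟩ := pv_match_bounds tokens t0 rest a h0 hq
      have hgl : a < (tokens.length : Int) := by simp at hb ⊢; omega
      refine ⟨⟨⟨h0, hgl⟩, ?_⟩, hq⟩
      rw [PySem.List.pyGetD_eq_getElem tokens "" h0 hgl]
      obtain ⟨_, hv⟩ := List.getElem?_eq_some_iff.mp hh
      exact hv
    · rintro ⟨⟨⟨h0, _⟩, _⟩, hq⟩
      obtain ⟨hb, _⟩ := pv_match_bounds tokens t0 rest a h0 hq
      exact ⟨⟨h0, by simp at hb ⊢; omega⟩, hq⟩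
-- drop the elements on which the step function is the identity


-- one region: A's scan over all start positions equals B's scan over the index entry
theorem pv_region_eq (tokens : List String) (t0 : String) (rest : List String) (tags : List String)
    (hlen : tags.length = tokens.length) :
    (PySem.List.pyRange 0 ((tokens.length : Int) - ((t0 :: rest).length : Int) + 1) 1).foldl
        (pvStepA tokens (t0 :: rest)) tags
      = ((PySem.List.pyRange 0 (tokens.length : Int) 1).filter
            (fun j => PySem.List.pyGetD tokens j "" == t0)).foldl (pvStepB tokens (t0 :: rest)) tags
    ∧ ((PySem.List.pyRange 0 ((tokens.length : Int) - ((t0 :: rest).length : Int) + 1) 1).foldl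
        (pvStepA tokens (t0 :: rest)) tags).length = tokens.length := by
  have hA := pv_foldl_filter (pvStepA tokens (t0 :: rest))
      (fun i => PySem.List.slice tokens (some i) (some (i + ((t0 :: rest).length : Int))) == t0 :: rest)
      (PySem.List.pyRange 0 ((tokens.length : Int) - ((t0 :: rest).length : Int) + 1) 1) tags
      (fun acc x _ hx => by simp only [pvStepA, hx, Bool.false_eq_true, if_false])
  have hB := pv_foldl_filter (pvStepB tokens (t0 :: rest))
      (fun i => PySem.List.slice tokens (some i) (some (i + ((t0 :: rest).length : Int))) == t0 :: rest)
      ((PySem.List.pyRange 0 (tokens.length : Int) 1).filter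
          (fun j => PySem.List.pyGetD tokens j "" == t0)) tags
      (fun acc x _ hx => by simp only [pvStepB, hx, Bool.false_and, Bool.false_eq_true, if_false])
  have hcongr := pv_foldl_congr_inv (fun l => l.length = tokens.length)
      (pvStepA tokens (t0 :: rest)) (pvStepB tokens (t0 :: rest))
      (((PySem.List.pyRange 0 (tokens.length : Int) 1).filter
          (fun j => PySem.List.pyGetD tokens j "" == t0)).filter
        (fun i => PySem.List.slice tokens (some i) (some (i + ((t0 :: rest).length : Int))) == t0 :: rest))
      tags hlen
      (fun acc x hP hx => by
        have hx1 := (List.mem_filter.mp hx).2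
        have hx2 := (List.mem_filter.mp (List.mem_filter.mp hx).1).1
        have h0 : 0 ≤ x := (PySem.List.mem_pyRange_one.mp hx2).1
        have hp : PySem.List.slice tokens (some x) (some (x + ((t0 :: rest).length : Int))) = t0 :: rest :=
          beq_iff_eq.mp hx1
        obtain ⟨heq, hlenB⟩ := pv_step_eq tokens t0 rest acc hP x h0 hp
        exact ⟨heq, by rw [heq]; exact hlenB⟩)
  rw [hA, pv_filter_eq tokens t0 rest]
  exact ⟨by rw [hcongr.1, ← hB], hcongr.2⟩


-- ===== VERDICT (by name: the statement is the Claim_ definition above) =====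
theorem create_bio_tags_spec : Claim_equal_create_bio_tags := by
  intro message regions _ hpre
  unfold Spec_create_bio_tags create_bio_tags create_bio_tags_alt
  simp only [List.cons.injEq, Prod.mk.injEq, true_and, and_true]
  refine (pv_foldl_congr_inv (fun l => l.length = (PySem.Str.split₀ message).length) _ _ regions
      (List.replicate (PySem.Str.split₀ message).length "O") (by simp) ?_).1
  intro acc region hP hmem
  by_cases hin : PySem.Str.isIn region message = true
  · cases hsp : PySem.Str.split₀ region with
    | nil => exact absurd hsp (hpre region hmem hin)
    | cons t0 rest =>
      simp only [hin, if_true]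
      rw [pv_index_getD]
      exact pv_region_eq (PySem.Str.split₀ message) t0 rest acc hP
  · simp only [hin, Bool.false_eq_true, if_false]
    exact ⟨trivial, hP⟩

@[simp] theorem create_bio_tags_raises : Claim_raises_create_bio_tags := by
  unfold Claim_raises_create_bio_tags
  constructor
  · intro message regions _ ⟨r, hr, hin, hsplit⟩ hpre
    exact hpre r hr hin hsplit
  · exact ⟨by decide, ⟨"", by decide, by decide, by decide⟩, by decide⟩
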